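-- pv_equiv track=rewrite | github.com/Anasterrar/Python | cryptography/Cipher/Decipher/Poly.py | valid_key_poly
-- ===== SOURCE A (Python) =====
-- def valid_key_poly(keys):
--     valid_space = [" ", ","]
--     digit = 0
--     for key in keys:
--         if key.isdigit():
--             digit += 1
--         if not key.isdigit():
--             if key not in valid_space:
--                 return False
--     if digit > 0:
--         return True
-- ===== SOURCE B (Python) =====
-- def valid_key_poly(keys):
--     if any(not c.isdigit() and c not in (' ', ',') for c in keys):
--         return False
--     if any(c.isdigit() for c in keys):
--         return True
-- ===== Notes on version B (the rewrite author's own statement) =====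
-- stated objective: simpler
-- what changed: Replaces the single counting loop (digit counter plus early return) with two sequential boolean any() scans: reject on any invalid character, then accept iff some digit exists, falling through to None otherwise.
import Mathlib
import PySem

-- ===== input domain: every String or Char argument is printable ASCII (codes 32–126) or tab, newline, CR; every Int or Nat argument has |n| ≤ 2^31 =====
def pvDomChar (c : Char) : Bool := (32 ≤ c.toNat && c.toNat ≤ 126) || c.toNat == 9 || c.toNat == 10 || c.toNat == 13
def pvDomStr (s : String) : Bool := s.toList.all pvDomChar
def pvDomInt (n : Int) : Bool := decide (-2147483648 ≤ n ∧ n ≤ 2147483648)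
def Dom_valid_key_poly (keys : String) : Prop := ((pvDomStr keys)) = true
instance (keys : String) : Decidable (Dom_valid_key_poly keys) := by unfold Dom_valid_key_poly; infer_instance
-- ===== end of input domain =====

-- B replaces A's counting loop with two sequential boolean scans (objective: simpler).

-- ===== PORT A =====
-- loop of A: carries the digit counter, returns early on an invalid character
def validKeyPolyLoop : List Char → Int → Option Bool
  | [], digit => if digit > 0 then some true else none
  | key :: rest, digit =>
    let digit' := if PySem.Chars.isdigit key then digit + 1 else digit
    if ¬ PySem.Chars.isdigit key then
      if ¬ (key = ' ' ∨ key = ',') then some false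
      else validKeyPolyLoop rest digit'
    else validKeyPolyLoop rest digit'

def valid_key_poly (keys : String) : Option Bool :=
  validKeyPolyLoop keys.toList 0

-- ===== PORT B =====
def valid_key_poly_alt (keys : String) : Option Bool :=
  if keys.toList.any (fun c => !PySem.Chars.isdigit c && !(c == ' ' || c == ',')) then
    some false
  else if keys.toList.any (fun c => PySem.Chars.isdigit c) then
    some true
  else
    none

-- ===== PRECONDITION & SPEC =====
def Spec_valid_key_poly (keys : String) (out : Option Bool) : Prop := out = valid_key_poly_alt keys
instance (keys : String) (out : Option Bool) : Decidable (Spec_valid_key_poly keys out) := by unfold Spec_valid_key_poly; infer_instance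

-- ===== CLAIM (what is proved, stated in full; the proofs are below) =====
def Claim_equal_valid_key_poly : Prop := ∀ (keys : String), Dom_valid_key_poly keys → Spec_valid_key_poly keys (valid_key_poly keys)

-- ===== LEMMAS AND PROOFS =====
theorem validKeyPolyLoop_eq (l : List Char) : ∀ d : Int, 0 ≤ d →
    validKeyPolyLoop l d =
      (if l.any (fun c => !PySem.Chars.isdigit c && !(c == ' ' || c == ',')) then some false
       else if d > 0 ∨ l.any (fun c => PySem.Chars.isdigit c) then some true
       else none) := by
  induction l with
  | nil =>
    intro d hd
    simp [validKeyPolyLoop]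
  | cons c rest ih =>
    intro d hd
    by_cases hdig : PySem.Chars.isdigit c
    · have step : validKeyPolyLoop (c :: rest) d = validKeyPolyLoop rest (d + 1) := by
        simp [validKeyPolyLoop, hdig]
      rw [step, ih (d + 1) (by omega)]
      simp [hdig, hd]
    · by_cases hsp : c = ' ' ∨ c = ','
      · have step : validKeyPolyLoop (c :: rest) d = validKeyPolyLoop rest d := by
          simp [validKeyPolyLoop, hdig, hsp]
        rw [step, ih d hd]
        rcases hsp with h | h <;> subst h <;> simp [hdig]
      · rcases not_or.mp hsp with ⟨h1, h2⟩
        simp [validKeyPolyLoop, hdig, h1, h2]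

-- ===== VERDICT (by name: the statement is the Claim_ definition above) =====
theorem valid_key_poly_spec : Claim_equal_valid_key_poly := by
  intro keys _
  unfold Spec_valid_key_poly valid_key_poly valid_key_poly_alt
  rw [validKeyPolyLoop_eq _ 0 le_rfl]
  simp
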